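-- pv_equiv track=rewrite | github.com/Racoo203/MA2008B | Reto/development/simulation/VRP.py | protocol
-- ===== SOURCE A (Python) =====
-- def protocol(actions, state):
--     # Prioritize deliver > load > return
--     for action in actions:
--         if action['type'] == 'deliver':
--             return action
--     for action in actions:
--         if action['type'] == 'load':
--             return action
--     for action in actions:
--         if action['type'] == 'return':
--             return action
--     return None
-- ===== SOURCE B (Python) =====
-- def protocol(actions, state):
--     # One pass: return immediately on the first 'deliver'; otherwise remember
--     # the first 'load' and the first 'return' seen, and pick by priority.
--     first_load = None
--     first_return = None
--     for action in actions:
--         t = action['type']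
--         if t == 'deliver':
--             return action
--         if t == 'load' and first_load is None:
--             first_load = action
--         elif t == 'return' and first_return is None:
--             first_return = action
--     if first_load is not None:
--         return first_load
--     return first_return
-- ===== Notes on version B (the rewrite author's own statement) =====
-- stated objective: simpler
-- what changed: Replaces A's three sequential scans of the action list with a single pass that early-returns on the first 'deliver' and records the first 'load' and first 'return' occurrences, choosing by priority afterwards.
import Mathlib
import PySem

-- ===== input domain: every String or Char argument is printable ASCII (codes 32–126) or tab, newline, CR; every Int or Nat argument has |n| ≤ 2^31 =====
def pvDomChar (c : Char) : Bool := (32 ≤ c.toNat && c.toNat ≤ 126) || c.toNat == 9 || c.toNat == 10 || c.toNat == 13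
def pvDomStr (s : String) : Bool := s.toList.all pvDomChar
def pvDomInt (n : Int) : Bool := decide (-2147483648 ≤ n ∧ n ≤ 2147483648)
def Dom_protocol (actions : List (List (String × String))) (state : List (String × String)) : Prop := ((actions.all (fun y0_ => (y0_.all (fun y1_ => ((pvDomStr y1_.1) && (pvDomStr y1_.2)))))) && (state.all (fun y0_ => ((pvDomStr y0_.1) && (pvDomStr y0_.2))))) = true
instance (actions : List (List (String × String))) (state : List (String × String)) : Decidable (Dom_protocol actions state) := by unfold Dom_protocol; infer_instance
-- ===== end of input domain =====

-- B replaces A's three sequential scans with one pass that early-returns on 'deliver'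
-- and remembers the first 'load' and first 'return' (objective: simpler).

-- action['type'] as a total lookup; exact on Pre_, where the key is present on every
-- action the Python actually reads.
def getT (a : List (String × String)) : String :=
  PySem.Dict.getD (PySem.Dict.mk a) "type" ""

-- ===== PORT A =====
-- the shared shape of A's three 'for action in actions: if action['type'] == t: return action' loops
def findType : List (List (String × String)) → String → Option (List (String × String))
  | [], _ => none
  | a :: rest, t => if getT a == t then some a else findType rest t

def protocol (actions : List (List (String × String))) (state : List (String × String)) : Option (List (String × String)) :=
  match findType actions "deliver" with
  | some a => some a
  | none =>
    match findType actions "load" with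
    | some a => some a
    | none =>
      match findType actions "return" with
      | some a => some a
      | none => none

-- ===== PORT B =====
-- B's single loop: accumulators first_load / first_return, early return on 'deliver'
def goB : List (List (String × String)) → Option (List (String × String)) → Option (List (String × String)) → Option (List (String × String))
  | [], firstLoad, firstReturn =>
    match firstLoad with
    | some x => some x
    | none => firstReturn
  | a :: rest, firstLoad, firstReturn =>
    let t := getT a
    if t == "deliver" then some a
    else if t == "load" && firstLoad.isNone then goB rest (some a) firstReturn
    else if t == "return" && firstReturn.isNone then goB rest firstLoad (some a)
    else goB rest firstLoad firstReturn

def protocol_alt (actions : List (List (String × String))) (state : List (String × String)) : Option (List (String × String)) :=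
  goB actions none none

-- ===== PRECONDITION & SPEC =====
-- Pre_ excludes exactly the inputs where the Pythons raise KeyError: some action
-- reached before the first 'deliver' has no 'type' key (both A and B raise there).
def Pre_protocol (actions : List (List (String × String))) (state : List (String × String)) : Prop :=
  ∀ a ∈ actions.takeWhile (fun a => !(getT a == "deliver")),
    (PySem.Dict.get? (PySem.Dict.mk a) "type").isSome
instance (actions : List (List (String × String))) (state : List (String × String)) : Decidable (Pre_protocol actions state) := by unfold Pre_protocol; infer_instance

def pvWitness_protocol : (List (List (String × String))) × (List (String × String)) :=
  ([[("type", "load")], [("type", "return")]], [])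

def Spec_protocol (actions : List (List (String × String))) (state : List (String × String)) (out : Option (List (String × String))) : Prop := out = protocol_alt actions state
instance (actions : List (List (String × String))) (state : List (String × String)) (out : Option (List (String × String))) : Decidable (Spec_protocol actions state out) := by unfold Spec_protocol; infer_instance

-- ===== CLAIM (what is proved, stated in full; the proofs are below) =====
def Claim_equal_protocol : Prop := ∀ (actions : List (List (String × String))) (state : List (String × String)), Dom_protocol actions state → Pre_protocol actions state → Spec_protocol actions state (protocol actions state)

-- ===== LEMMAS AND PROOFS =====

-- the loop invariant: B's one pass equals A's three scans merged with the accumulators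
lemma goB_eq (acts : List (List (String × String))) :
    ∀ (l r : Option (List (String × String))),
      goB acts l r =
        (findType acts "deliver").or ((l.or (findType acts "load")).or (r.or (findType acts "return"))) := by
  induction acts with
  | nil =>
    intro l r
    cases l <;> cases r <;> simp [goB, findType, Option.or]
  | cons a rest ih =>
    intro l r
    simp only [goB, findType]
    by_cases hD : getT a = "deliver"
    · simp [hD, Option.or]
    · have hD' : (getT a == "deliver") = false := by simp [hD]
      rw [hD']
      by_cases hL : getT a = "load"
      · have hR : (getT a == "return") = false := by simp [hL]
        cases l with
        | none => simp [hL, ih, Option.or]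
        | some x => simp [hL, ih, Option.or]
      · have hL' : (getT a == "load") = false := by simp [hL]
        rw [hL']
        by_cases hR : getT a = "return"
        · cases r with
          | none => simp [hR, ih, Option.or]
          | some x => simp [hR, ih, Option.or]
        · have hR' : (getT a == "return") = false := by simp [hR]
          simp [hR', ih]

-- ===== VERDICT (by name: the statement is the Claim_ definition above) =====
theorem protocol_spec : Claim_equal_protocol := by
  intro actions state _ _
  show protocol actions state = protocol_alt actions state
  unfold protocol protocol_alt
  rw [goB_eq]
  cases findType actions "deliver" <;>
    cases findType actions "load" <;>
      cases findType actions "return" <;> simp [Option.or]
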